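-- pv_equiv track=rewrite | github.com/cokemania2/LeetCode | 프로그래머스/2/132265. 롤케이크 자르기/롤케이크 자르기.py | solution
-- ===== SOURCE A (Python) =====
-- def get_topping_set_list(topping):
--     topping_set = set()
--     set_list = []
--
--     for v in topping:
--         topping_set.add(v)
--         set_list.append(len(topping_set))
--
--     return set_list
--
-- def solution(topping):
--     answer = 0
--
--     reverse_cake = reversed(topping)
--
--     topping_set_list = get_topping_set_list(topping)
--     reversed_topping_set_list = list(reversed(get_topping_set_list(reverse_cake)))
--
--     for i in range(1, len(topping_set_list)):
--         if topping_set_list[i - 1] == reversed_topping_set_list[i]: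
--             answer += 1
--
--     return answer
-- ===== SOURCE B (Python) =====
-- def solution(topping):
--     last = {}
--     for i, v in enumerate(topping):
--         last[v] = i
--     left = set()
--     right = len(last)
--     answer = 0
--     n = len(topping)
--     for i, v in enumerate(topping):
--         left.add(v)
--         if last[v] == i:
--             right -= 1
--         if i < n - 1 and len(left) == right:
--             answer += 1
--     return answer
-- ===== Notes on version B (the rewrite author's own statement) =====
-- stated objective: alternative
-- what changed: Replaces A's two precomputed prefix/suffix distinct-count lists (built with two set passes plus a reversal) by a single incremental pass that grows a left set and decrements an integer right distinct count at each value's last occurrence (last indices from one dict pass).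
import Mathlib
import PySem

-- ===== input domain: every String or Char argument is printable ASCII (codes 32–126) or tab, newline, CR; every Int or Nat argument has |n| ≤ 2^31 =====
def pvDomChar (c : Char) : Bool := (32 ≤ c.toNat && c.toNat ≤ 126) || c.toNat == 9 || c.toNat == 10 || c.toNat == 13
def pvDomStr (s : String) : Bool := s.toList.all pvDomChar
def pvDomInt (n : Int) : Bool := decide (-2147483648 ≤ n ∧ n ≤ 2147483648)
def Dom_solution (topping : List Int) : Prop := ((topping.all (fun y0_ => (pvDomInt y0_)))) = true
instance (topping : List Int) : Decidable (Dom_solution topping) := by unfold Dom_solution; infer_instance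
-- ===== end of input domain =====

-- B replaces A's two precomputed prefix/suffix distinct-count arrays by a single incremental pass
-- (a growing left set and a right distinct count that drops at each value's last occurrence).

-- ===== PORT A =====
def get_topping_set_list (topping : List Int) : List Int :=
  (topping.foldl
    (fun (st : PySem.Set Int × List Int) v =>
      let s := PySem.Set.add st.1 v
      (s, st.2 ++ [PySem.Set.len s]))
    (PySem.Set.empty, [])).2

def solution (topping : List Int) : Int :=
  let tsl := get_topping_set_list topping
  let rtsl := (get_topping_set_list topping.reverse).reverse
  (PySem.List.pyRange 1 (PySem.List.len tsl) 1).foldl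
    (fun answer i =>
      if PySem.List.pyGetD tsl (i - 1) 0 = PySem.List.pyGetD rtsl i 0 then answer + 1
      else answer)
    0

-- ===== PORT B =====
-- body of B's main loop on (i, v): grow the left set, decrement the right distinct count at v's
-- last index, count the cut when both sides still non-empty and the counts agree
def bStep (last : PySem.Dict Int Int) (n : Int)
    (st : PySem.Set Int × Int × Int) (p : Int × Int) : PySem.Set Int × Int × Int :=
  let left := PySem.Set.add st.1 p.2
  let right := if PySem.Dict.getD last p.2 0 = p.1 then st.2.1 - 1 else st.2.1
  let answer := if p.1 < n - 1 ∧ PySem.Set.len left = right then st.2.2 + 1 else st.2.2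
  (left, right, answer)

def solution_alt (topping : List Int) : Int :=
  let last := (PySem.List.enumerate topping 0).foldl
    (fun d p => PySem.Dict.insert d p.2 p.1) PySem.Dict.empty
  let n := PySem.List.len topping
  ((PySem.List.enumerate topping 0).foldl (bStep last n)
    (PySem.Set.empty, (PySem.Dict.size last : Int), 0)).2.2

-- ===== PRECONDITION & SPEC =====
def Spec_solution (topping : List Int) (out : Int) : Prop := out = solution_alt topping
instance (topping : List Int) (out : Int) : Decidable (Spec_solution topping out) := by unfold Spec_solution; infer_instance

-- ===== CLAIM (what is proved, stated in full; the proofs are below) =====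
def Claim_equal_solution : Prop := ∀ (topping : List Int), Dom_solution topping → Spec_solution topping (solution topping)

-- ===== LEMMAS AND PROOFS =====

-- number of distinct elements of xs
def dc (xs : List Int) : Nat := (PySem.Set.ofList xs).length

-- the common reference value: cuts i = k+1, 1 ≤ i ≤ n-1, with equal distinct counts
def refCount (l : List Int) : Nat :=
  (List.range (l.length - 1)).countP (fun k => decide (dc (l.take (k + 1)) = dc (l.drop (k + 1))))

lemma dc_toFinset (xs : List Int) : dc xs = xs.toFinset.card := by
  have hnd : (PySem.Set.ofList xs).Nodup := PySem.Set.nodup_ofList xs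
  have h : (PySem.Set.ofList xs).toFinset = xs.toFinset := by
    ext a; simp [PySem.Set.mem_ofList]
  rw [dc, ← List.toFinset_card_of_nodup hnd, h]

lemma dc_reverse (xs : List Int) : dc xs.reverse = dc xs := by
  simp [dc_toFinset]

lemma dc_cons (v : Int) (xs : List Int) :
    dc (v :: xs) = (if v ∈ xs then 0 else 1) + dc xs := by
  simp only [dc_toFinset, List.toFinset_cons]
  by_cases h : v ∈ xs
  · simp [h, Finset.insert_eq_self.mpr (List.mem_toFinset.mpr h)]
  · rw [Finset.card_insert_of_notMem (by simpa using h)]; simp [h]; omega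

-- ----- A side -----

lemma gtsl_fold (l : List Int) : ∀ (s : PySem.Set Int) (acc : List Int),
    (l.foldl
      (fun (st : PySem.Set Int × List Int) v =>
        let s := PySem.Set.add st.1 v
        (s, st.2 ++ [PySem.Set.len s])) (s, acc)).2
    = acc ++ (List.range l.length).map
        (fun j => ((PySem.Set.update s (l.take (j + 1))).length : Int)) := by
  induction l with
  | nil => simp
  | cons v t ih =>
    intro s acc
    have hr : (List.range (t.length + 1)).map
          (fun j => ((PySem.Set.update s ((v :: t).take (j + 1))).length : Int))
        = ((PySem.Set.add s v).length : Int) ::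
          (List.range t.length).map
            (fun j => ((PySem.Set.update (PySem.Set.add s v) (t.take (j + 1))).length : Int)) := by
      rw [List.range_succ_eq_map, List.map_cons, List.map_map]
      refine congrArg₂ _ (by simp [PySem.Set.update_cons, PySem.Set.update_nil]) ?_
      apply List.map_congr_left
      intro j hj
      simp [Function.comp, List.take_succ_cons, PySem.Set.update_cons]
    simp only [List.foldl_cons, List.length_cons]
    rw [ih, hr]
    simp [PySem.Set.len]

lemma gtsl_eq (l : List Int) :
    get_topping_set_list l
      = (List.range l.length).map (fun j => (dc (l.take (j + 1)) : Int)) := by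
  unfold get_topping_set_list
  rw [gtsl_fold]
  simp only [List.nil_append]
  apply List.map_congr_left
  intro j hj
  rw [PySem.Set.update_empty, dc]

lemma solution_eq_refCount (l : List Int) : solution l = (refCount l : Int) := by
  unfold solution
  simp only [gtsl_eq]
  have hlen : PySem.List.len ((List.range l.length).map
      (fun j => (dc (l.take (j + 1)) : Int))) = (l.length : Int) := by
    simp [PySem.List.len_eq]
  rw [hlen]
  have hfo := PySem.List.foldl_count_if
    (fun i => decide (PySem.List.pyGetD ((List.range l.length).map
        (fun j => (dc (l.take (j + 1)) : Int))) (i - 1) 0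
      = PySem.List.pyGetD (((List.range l.reverse.length).map
        (fun j => (dc (l.reverse.take (j + 1)) : Int))).reverse) i 0))
    (PySem.List.pyRange 1 (l.length : Int) 1) 0
  simp only [decide_eq_true_eq] at hfo
  rw [hfo, zero_add]
  rw [PySem.List.pyRange_one, List.countP_map]
  have htn : ((l.length : Int) - 1).toNat = l.length - 1 := by omega
  rw [htn]
  unfold refCount
  norm_cast
  apply List.countP_congr
  intro k hk
  rw [List.mem_range] at hk
  have hkn : k + 1 < l.length := by omega
  simp only [Function.comp]
  have hi1 : (((1 + k : Nat)) : Int) - 1 = ((k : Nat) : Int) := by push_cast; ring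
  have hi2 : (((1 + k : Nat)) : Int) = (((k + 1 : Nat)) : Int) := by push_cast; ring
  simp only [decide_eq_true_eq]
  rw [hi1, hi2, PySem.List.pyGetD_natCast, PySem.List.pyGetD_natCast]
  rw [PySem.List.getD_map_range _ _ _ _ (by omega)]
  have hrt : (((List.range l.reverse.length).map
      (fun j => (dc (l.reverse.take (j + 1)) : Int))).reverse).getD (k + 1) 0
      = (dc (l.drop (k + 1)) : Int) := by
    rw [List.getD_eq_getElem?_getD, List.getElem?_reverse (by simpa using hkn)]
    have hm : ((List.range l.reverse.length).map
        (fun j => (dc (l.reverse.take (j + 1)) : Int))).length - 1 - (k + 1)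
        = l.length - 2 - k := by simp; omega
    rw [hm]
    rw [List.getElem?_map, List.getElem?_range (by simp; omega)]
    simp only [Option.map_some, Option.getD_some]
    have ht : l.length - 2 - k + 1 = l.length - (k + 1) := by omega
    rw [ht]
    have := List.take_reverse (xs := l) (i := l.length - (k + 1))
    rw [this]
    have hd : l.length - (l.length - (k + 1)) = k + 1 := by omega
    rw [hd, dc_reverse]
  rw [hrt]
  simp [Nat.cast_inj]

-- ----- B side -----

lemma mkLast_append (l : List Int) (x : Int) :
    (PySem.List.enumerate (l ++ [x]) 0).foldl
        (fun d p => PySem.Dict.insert d p.2 p.1) PySem.Dict.empty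
      = PySem.Dict.insert
          ((PySem.List.enumerate l 0).foldl
            (fun d p => PySem.Dict.insert d p.2 p.1) PySem.Dict.empty)
          x (l.length : Int) := by
  rw [PySem.List.enumerate_append, List.foldl_append]
  simp [PySem.List.enumerate]

lemma mkLast_getD (v : Int) : ∀ (suf pre : List Int),
    (PySem.Dict.getD
        ((PySem.List.enumerate (pre ++ v :: suf) 0).foldl
          (fun d p => PySem.Dict.insert d p.2 p.1) PySem.Dict.empty)
        v 0 = (pre.length : Int)) ↔ v ∉ suf := by
  intro suf
  induction suf using List.reverseRecOn with
  | nil =>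
    intro pre
    have h : pre ++ v :: ([] : List Int) = pre ++ [v] := by simp
    rw [h, mkLast_append, PySem.Dict.getD_insert_self]
    simp
  | append_singleton s x ih =>
    intro pre
    have h : pre ++ v :: (s ++ [x]) = (pre ++ v :: s) ++ [x] := by simp
    rw [h, mkLast_append]
    by_cases hvx : v = x
    · subst hvx
      rw [PySem.Dict.getD_insert_self]
      constructor
      · intro he
        exfalso
        have : (pre ++ v :: s).length = pre.length := by exact_mod_cast he
        simp at this
      · intro hns; exact absurd (by simp) hns
    · rw [PySem.Dict.getD_insert_of_ne _ _ _ hvx, ih pre]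
      simp [hvx]

lemma mkLast_size (l : List Int) :
    ((PySem.List.enumerate l 0).foldl
        (fun d p => PySem.Dict.insert d p.2 p.1) PySem.Dict.empty).size = dc l := by
  have hk := PySem.Dict.keys_foldl_insert_key (PySem.List.enumerate l 0)
    (fun p => p.2) (fun d (p : Int × Int) => p.1) (PySem.Dict.empty (κ := Int) (ν := Int))
  have hlen : ((PySem.List.enumerate l 0).foldl
      (fun d p => PySem.Dict.insert d p.2 p.1) PySem.Dict.empty).keys.length
      = ((PySem.List.enumerate l 0).foldl
      (fun d p => PySem.Dict.insert d p.2 p.1)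
      (PySem.Dict.empty (κ := Int) (ν := Int))).size := by
    simp [PySem.Dict.keys, PySem.Dict.size]
  rw [← hlen, hk]
  have hsnd : (PySem.List.enumerate l 0).map (fun p => p.2) = l :=
    PySem.List.map_snd_enumerate l 0
  rw [hsnd]
  have : (PySem.Dict.empty (κ := Int) (ν := Int)).keys = ([] : List Int) := rfl
  rw [this, dc]
  rw [show PySem.Set.update ([] : List Int) l = PySem.Set.ofList l from PySem.Set.update_empty l]

lemma bLoop (l : List Int) : ∀ (suf pre : List Int) (ans : Int), l = pre ++ suf →
    ((PySem.List.enumerate suf (pre.length : Int)).foldl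
        (bStep ((PySem.List.enumerate l 0).foldl
          (fun d p => PySem.Dict.insert d p.2 p.1) PySem.Dict.empty) (l.length : Int))
        (PySem.Set.ofList pre, (dc suf : Int), ans)).2.2
      = ans + ((List.range' pre.length (l.length - 1 - pre.length)).countP
          (fun k => decide (dc (l.take (k + 1)) = dc (l.drop (k + 1)))) : Int) := by
  intro suf
  induction suf with
  | nil =>
    intro pre ans hl
    subst hl
    simp [PySem.List.enumerate_nil]
  | cons v rest ih =>
    intro pre ans hl
    have hn : l.length = pre.length + rest.length + 1 := by subst hl; simp; omega
    rw [PySem.List.enumerate_cons, List.foldl_cons]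
    have hiff : (PySem.Dict.getD ((PySem.List.enumerate l 0).foldl
        (fun d p => PySem.Dict.insert d p.2 p.1) PySem.Dict.empty) v 0
        = ((pre.length : Nat) : Int)) ↔ v ∉ rest := by
      rw [hl]; exact mkLast_getD v rest pre
    have hright : (if PySem.Dict.getD ((PySem.List.enumerate l 0).foldl
        (fun d p => PySem.Dict.insert d p.2 p.1) PySem.Dict.empty) v 0
        = ((pre.length : Nat) : Int)
        then ((dc (v :: rest) : Nat) : Int) - 1 else ((dc (v :: rest) : Nat) : Int))
        = ((dc rest : Nat) : Int) := by
      by_cases hm : v ∈ rest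
      · rw [if_neg (by rw [hiff]; simp [hm])]
        rw [dc_cons]; simp [hm]
      · rw [if_pos (hiff.mpr hm)]
        rw [dc_cons]; simp [hm]
    simp only [bStep]
    rw [hright, ← PySem.Set.ofList_append_singleton]
    have hidx : ((pre.length : Nat) : Int) + 1 = (((pre ++ [v]).length : Nat) : Int) := by
      simp
    rw [hidx, ih (pre ++ [v]) _ (by subst hl; simp)]
    have hc2 : PySem.Set.len (PySem.Set.ofList (pre ++ [v])) = ((dc (pre ++ [v]) : Nat) : Int) := by
      simp [PySem.Set.len, dc]
    rcases Nat.eq_zero_or_pos rest.length with h0 | hpos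
    · have hz1 : l.length - 1 - pre.length = 0 := by omega
      have hz2 : l.length - 1 - (pre ++ [v]).length = 0 := by simp; omega
      rw [hz1, hz2]
      rw [if_neg (by rintro ⟨h1, -⟩; omega)]
      simp
    · obtain ⟨m, hm⟩ : ∃ m, rest.length = m + 1 := ⟨rest.length - 1, by omega⟩
      have hr1 : l.length - 1 - pre.length = m + 1 := by omega
      have hr2 : l.length - 1 - (pre ++ [v]).length = m := by simp; omega
      rw [hr1, hr2, List.range'_succ, List.countP_cons]
      have hsplit : l = (pre ++ [v]) ++ rest := by subst hl; simp
      have htake : l.take (pre.length + 1) = pre ++ [v] := by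
        rw [show pre.length + 1 = (pre ++ [v]).length by simp, hsplit, List.take_left]
      have hdrop : l.drop (pre.length + 1) = rest := by
        rw [show pre.length + 1 = (pre ++ [v]).length by simp, hsplit, List.drop_left]
      have hc1 : ((pre.length : Nat) : Int) < (l.length : Int) - 1 := by
        omega
      by_cases heq : dc (pre ++ [v]) = dc rest
      · rw [if_pos ⟨hc1, by rw [hc2, heq]⟩]
        simp only [htake, hdrop, heq, decide_true]
        rw [show (pre ++ [v]).length = pre.length + 1 by simp]
        push_cast; ring
      · rw [if_neg (by rintro ⟨-, h2⟩; rw [hc2] at h2; exact heq (by exact_mod_cast h2))]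
        simp only [htake, hdrop]
        rw [if_neg (by simpa using heq)]
        rw [show (pre ++ [v]).length = pre.length + 1 by simp]
        push_cast; ring

lemma solution_alt_eq_refCount (l : List Int) : solution_alt l = (refCount l : Int) := by
  simp only [solution_alt]
  rw [PySem.List.len_eq, mkLast_size]
  have hb := bLoop l l [] 0 (by simp)
  unfold refCount
  rw [List.range_eq_range' (n := l.length - 1)]
  simpa [PySem.Set.ofList, PySem.Set.empty] using hb

-- ===== VERDICT (by name: the statement is the Claim_ definition above) =====
theorem solution_spec : Claim_equal_solution := by
  intro topping _
  unfold Spec_solution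
  rw [solution_eq_refCount, solution_alt_eq_refCount]
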